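-- pv_equiv track=rewrite | github.com/Pollysoma/protein-prediction-project-2 | src/membership_splits/taxonomy.py | kingdom_from_local
-- ===== SOURCE A (Python) =====
-- from typing import Dict, List, Tuple
--
-- def classify_lineage_list(lineage_list: List[str]) -> str:
--     """
--     Determines kingdom from a list of taxonomic names.
--     Example: ['Bacteria', 'Actinomycetota', ...] -> 'Bacteria'
--     """
--     names = {n.lower() for n in lineage_list}
--
--     if "metazoa" in names or "animalia" in names:
--         return "Metazoa"
--     if "viridiplantae" in names or "plantae" in names:
--         return "Viridiplantae"
--     if "fungi" in names:
--         return "Fungi"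
--     if "bacteria" in names:
--         return "Bacteria"
--     if "archaea" in names:
--         return "Archaea"
--     if "viruses" in names:
--         return "Viruses"
--     if "eukaryota" in names:
--         return "Other Eukaryota"
--     return "Unknown"
--
-- def kingdom_from_local(tid: int, taxa: Dict[int, Tuple[int, str]], names: Dict[int, str]) -> str:
--     if not tid or tid not in taxa:
--         return "Unknown"
--     lineage: List[str] = []
--     curr = tid
--     while True:
--         if curr in names:
--             lineage.append(names[curr])
--         parent, _ = taxa.get(curr, (1, "no_rank"))
--         if parent == curr or parent == 1:
--             break
--         curr = parent
--     return classify_lineage_list(lineage)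
-- ===== SOURCE B (Python) =====
-- _RANKS = {"metazoa": 0, "animalia": 0, "viridiplantae": 1, "plantae": 1,
--           "fungi": 2, "bacteria": 3, "archaea": 4, "viruses": 5, "eukaryota": 6}
-- _KINGDOMS = ["Metazoa", "Viridiplantae", "Fungi", "Bacteria",
--              "Archaea", "Viruses", "Other Eukaryota"]
--
-- def kingdom_from_local(tid, taxa, names):
--     if not tid or tid not in taxa:
--         return "Unknown"
--     best = 7  # sentinel: no classifying keyword seen yet
--     curr = tid
--     while True:
--         if curr in names:
--             r = _RANKS.get(names[curr].lower(), 7)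
--             if r < best:
--                 best = r
--         parent, _ = taxa.get(curr, (1, "no_rank"))
--         if parent == curr or parent == 1:
--             break
--         curr = parent
--     return _KINGDOMS[best] if best < 7 else "Unknown"
-- ===== Notes on version B (the rewrite author's own statement) =====
-- stated objective: simpler
-- what changed: Instead of collecting the lineage into a list and then classifying it through a set plus a priority if-chain, B classifies on the fly: it maps each visited name to a priority rank via a keyword dict and maintains a running minimum during the single parent-chain walk, translating the final rank to the kingdom string.
import Mathlib
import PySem

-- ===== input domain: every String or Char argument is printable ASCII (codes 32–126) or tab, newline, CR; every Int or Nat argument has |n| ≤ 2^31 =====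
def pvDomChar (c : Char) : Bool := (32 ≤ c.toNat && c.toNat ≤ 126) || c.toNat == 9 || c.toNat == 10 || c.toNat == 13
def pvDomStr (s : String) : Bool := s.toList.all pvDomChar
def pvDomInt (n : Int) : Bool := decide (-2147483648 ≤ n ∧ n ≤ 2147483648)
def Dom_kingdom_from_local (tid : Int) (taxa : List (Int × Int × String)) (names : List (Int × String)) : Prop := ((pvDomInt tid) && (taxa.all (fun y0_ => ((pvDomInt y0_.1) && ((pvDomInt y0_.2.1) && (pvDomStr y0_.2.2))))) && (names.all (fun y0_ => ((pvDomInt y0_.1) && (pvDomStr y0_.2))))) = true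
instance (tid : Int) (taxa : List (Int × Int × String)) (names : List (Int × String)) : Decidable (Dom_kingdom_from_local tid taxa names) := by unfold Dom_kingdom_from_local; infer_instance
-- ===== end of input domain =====

-- B fuses A's two passes: instead of collecting the lineage and classifying it afterwards,
-- it keeps a running minimum priority rank while walking the parent chain (objective: simpler).

-- ===== PORT A =====
-- classify_lineage_list: build the set of lowercased names, then the if-chain
def pvClassify (l : List String) : String :=
  let ns : PySem.Set String := PySem.Set.ofList (l.map PySem.Str.lower)
  if "metazoa" ∈ ns ∨ "animalia" ∈ ns then "Metazoa"
  else if "viridiplantae" ∈ ns ∨ "plantae" ∈ ns then "Viridiplantae"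
  else if "fungi" ∈ ns then "Fungi"
  else if "bacteria" ∈ ns then "Bacteria"
  else if "archaea" ∈ ns then "Archaea"
  else if "viruses" ∈ ns then "Viruses"
  else if "eukaryota" ∈ ns then "Other Eukaryota"
  else "Unknown"

-- A's while-loop, collecting the visited names in order; fuel = taxa.length + 1 suffices
-- on every input where the Python loop terminates (see Pre_).
def pvWalkA (taxa : List (Int × Int × String)) (names : List (Int × String)) : Nat → Int → List String
  | 0, _ => []
  | fuel + 1, curr =>
    let visit : List String :=
      match (PySem.Dict.mk names).get? curr with
      | some n => [n]
      | none => []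
    let pr := (PySem.Dict.mk taxa).getD curr (1, "no_rank")
    if pr.1 = curr ∨ pr.1 = 1 then visit
    else visit ++ pvWalkA taxa names fuel pr.1

def kingdom_from_local (tid : Int) (taxa : List (Int × Int × String)) (names : List (Int × String)) : String :=
  if tid = 0 ∨ (PySem.Dict.mk taxa).contains tid = false then "Unknown"
  else pvClassify (pvWalkA taxa names (taxa.length + 1) tid)

-- ===== PORT B =====
-- _RANKS.get(s, 7) on the fixed literal keyword dict
def pvRank (s : String) : Nat :=
  if s = "metazoa" ∨ s = "animalia" then 0
  else if s = "viridiplantae" ∨ s = "plantae" then 1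
  else if s = "fungi" then 2
  else if s = "bacteria" then 3
  else if s = "archaea" then 4
  else if s = "viruses" then 5
  else if s = "eukaryota" then 6
  else 7

def pvKingdoms : List String :=
  ["Metazoa", "Viridiplantae", "Fungi", "Bacteria", "Archaea", "Viruses", "Other Eukaryota"]

-- B's while-loop: same chain walk, maintaining the running minimum rank
def pvWalkB (taxa : List (Int × Int × String)) (names : List (Int × String)) : Nat → Int → Nat → Nat
  | 0, _, best => best
  | fuel + 1, curr, best =>
    let best' : Nat :=
      match (PySem.Dict.mk names).get? curr with
      | some n => if pvRank (PySem.Str.lower n) < best then pvRank (PySem.Str.lower n) else best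
      | none => best
    let pr := (PySem.Dict.mk taxa).getD curr (1, "no_rank")
    if pr.1 = curr ∨ pr.1 = 1 then best'
    else pvWalkB taxa names fuel pr.1 best'

def kingdom_from_local_alt (tid : Int) (taxa : List (Int × Int × String)) (names : List (Int × String)) : String :=
  if tid = 0 ∨ (PySem.Dict.mk taxa).contains tid = false then "Unknown"
  else
    let best := pvWalkB taxa names (taxa.length + 1) tid 7
    if best < 7 then pvKingdoms.getD best "Unknown" else "Unknown"

-- ===== PRECONDITION & SPEC =====
def pvParent (taxa : List (Int × Int × String)) (c : Int) : Int :=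
  ((PySem.Dict.mk taxa).getD c (1, "no_rank")).1

-- Pre_ excludes exactly the inputs whose parent chain from tid never reaches a stopping node
-- (parent = self or parent = 1): there Python A's while-loop runs forever and returns nothing.
def Pre_kingdom_from_local (tid : Int) (taxa : List (Int × Int × String)) (names : List (Int × String)) : Prop :=
  tid = 0 ∨ (PySem.Dict.mk taxa).contains tid = false ∨
    ∃ n < taxa.length + 1,
      pvParent taxa ((pvParent taxa)^[n] tid) = (pvParent taxa)^[n] tid ∨
      pvParent taxa ((pvParent taxa)^[n] tid) = 1

instance (tid : Int) (taxa : List (Int × Int × String)) (names : List (Int × String)) : Decidable (Pre_kingdom_from_local tid taxa names) := by unfold Pre_kingdom_from_local; infer_instance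

def pvWitness_kingdom_from_local : Int × (List (Int × Int × String)) × (List (Int × String)) :=
  (2, [(2, 1, "species")], [(2, "Bacteria")])

def Spec_kingdom_from_local (tid : Int) (taxa : List (Int × Int × String)) (names : List (Int × String)) (out : String) : Prop := out = kingdom_from_local_alt tid taxa names
instance (tid : Int) (taxa : List (Int × Int × String)) (names : List (Int × String)) (out : String) : Decidable (Spec_kingdom_from_local tid taxa names out) := by unfold Spec_kingdom_from_local; infer_instance

-- ===== CLAIM (what is proved, stated in full; the proofs are below) =====
def Claim_equal_kingdom_from_local : Prop := ∀ (tid : Int) (taxa : List (Int × Int × String)) (names : List (Int × String)), Dom_kingdom_from_local tid taxa names → Pre_kingdom_from_local tid taxa names → Spec_kingdom_from_local tid taxa names (kingdom_from_local tid taxa names)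

-- ===== LEMMAS AND PROOFS =====

-- the classify if-chain phrased over plain list membership of the lowered names
def pvClassifyC (L : List String) : String :=
  if "metazoa" ∈ L ∨ "animalia" ∈ L then "Metazoa"
  else if "viridiplantae" ∈ L ∨ "plantae" ∈ L then "Viridiplantae"
  else if "fungi" ∈ L then "Fungi"
  else if "bacteria" ∈ L then "Bacteria"
  else if "archaea" ∈ L then "Archaea"
  else if "viruses" ∈ L then "Viruses"
  else if "eukaryota" ∈ L then "Other Eukaryota"
  else "Unknown"

lemma classify_eq_classifyC (l : List String) :
    pvClassify l = pvClassifyC (l.map PySem.Str.lower) := by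
  simp [pvClassify, pvClassifyC, PySem.Set.mem_ofList]

-- minimum rank of a (lowered) name list, sentinel 7
def pvMr (L : List String) : Nat := (L.map pvRank).foldr min 7

lemma pvRank_le7 (s : String) : pvRank s ≤ 7 := by
  unfold pvRank; split_ifs <;> omega

lemma pvMr_le7 (L : List String) : pvMr L ≤ 7 := by
  induction L with
  | nil => simp [pvMr]
  | cons n L ih => simp only [pvMr, List.map_cons, List.foldr_cons]; exact le_trans (Nat.min_le_right _ _) ih

lemma pvMr_le_of_mem {s : String} {L : List String} (h : s ∈ L) : pvMr L ≤ pvRank s := by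
  induction L with
  | nil => simp at h
  | cons n L ih =>
    simp only [pvMr, List.map_cons, List.foldr_cons]
    rcases List.mem_cons.mp h with rfl | h'
    · exact Nat.min_le_left _ _
    · exact le_trans (Nat.min_le_right _ _) (ih h')

lemma pvMr_cases (L : List String) : pvMr L = 7 ∨ ∃ s ∈ L, pvMr L = pvRank s := by
  induction L with
  | nil => left; rfl
  | cons n L ih =>
    have hstep : pvMr (n :: L) = min (pvRank n) (pvMr L) := by
      simp [pvMr]
    rcases Nat.le_total (pvRank n) (pvMr L) with h | h
    · right; exact ⟨n, List.mem_cons_self, by rw [hstep]; exact Nat.min_eq_left h⟩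
    · rcases ih with h7 | ⟨s, hs, he⟩
      · left; rw [h7] at h; rw [hstep, h7]; exact Nat.min_eq_right h
      · right; refine ⟨s, List.mem_cons_of_mem _ hs, ?_⟩
        rw [he] at h; rw [hstep, he]; exact Nat.min_eq_right h

-- rank inversion: which strings carry each rank
lemma rank_inv0 {s : String} (h : pvRank s = 0) : s = "metazoa" ∨ s = "animalia" := by
  unfold pvRank at h; split_ifs at h <;> simp_all
lemma rank_inv1 {s : String} (h : pvRank s = 1) : s = "viridiplantae" ∨ s = "plantae" := by
  unfold pvRank at h; split_ifs at h <;> simp_all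
lemma rank_inv2 {s : String} (h : pvRank s = 2) : s = "fungi" := by
  unfold pvRank at h; split_ifs at h <;> simp_all
lemma rank_inv3 {s : String} (h : pvRank s = 3) : s = "bacteria" := by
  unfold pvRank at h; split_ifs at h <;> simp_all
lemma rank_inv4 {s : String} (h : pvRank s = 4) : s = "archaea" := by
  unfold pvRank at h; split_ifs at h <;> simp_all
lemma rank_inv5 {s : String} (h : pvRank s = 5) : s = "viruses" := by
  unfold pvRank at h; split_ifs at h <;> simp_all
lemma rank_inv6 {s : String} (h : pvRank s = 6) : s = "eukaryota" := by
  unfold pvRank at h; split_ifs at h <;> simp_all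

-- a keyword of rank r < pvMr L cannot be a member of L
lemma not_mem_of_rank_lt {s : String} {L : List String} (h : pvRank s < pvMr L) : s ∉ L :=
  fun hm => absurd (pvMr_le_of_mem hm) (by omega)

-- B's finishing step as a function of the minimum rank
def pvFinish (best : Nat) : String :=
  if best < 7 then pvKingdoms.getD best "Unknown" else "Unknown"

lemma classifyC_eq_finish (L : List String) : pvClassifyC L = pvFinish (pvMr L) := by
  have h7 := pvMr_le7 L
  by_cases h : pvMr L = 7
  · -- no keyword present: every keyword has rank < 7 = pvMr L
    have n0 : "metazoa" ∉ L := not_mem_of_rank_lt (by rw [h]; decide)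
    have n1 : "animalia" ∉ L := not_mem_of_rank_lt (by rw [h]; decide)
    have n2 : "viridiplantae" ∉ L := not_mem_of_rank_lt (by rw [h]; decide)
    have n3 : "plantae" ∉ L := not_mem_of_rank_lt (by rw [h]; decide)
    have n4 : "fungi" ∉ L := not_mem_of_rank_lt (by rw [h]; decide)
    have n5 : "bacteria" ∉ L := not_mem_of_rank_lt (by rw [h]; decide)
    have n6 : "archaea" ∉ L := not_mem_of_rank_lt (by rw [h]; decide)
    have n7 : "viruses" ∉ L := not_mem_of_rank_lt (by rw [h]; decide)
    have n8 : "eukaryota" ∉ L := not_mem_of_rank_lt (by rw [h]; decide)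
    simp [pvClassifyC, pvFinish, h, n0, n1, n2, n3, n4, n5, n6, n7, n8]
  · have hlt : pvMr L < 7 := lt_of_le_of_ne h7 h
    rcases pvMr_cases L with h7' | ⟨s, hs, he⟩
    · exact absurd h7' h
    have hle := pvMr_le_of_mem hs
    interval_cases hm : pvMr L
    · have hr : pvRank s = 0 := by omega
      rcases rank_inv0 hr with rfl | rfl <;>
        simp [pvClassifyC, pvFinish, hs, pvKingdoms]
    · have n0 : "metazoa" ∉ L := not_mem_of_rank_lt (by rw [hm]; decide)
      have n1 : "animalia" ∉ L := not_mem_of_rank_lt (by rw [hm]; decide)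
      have hr : pvRank s = 1 := by omega
      rcases rank_inv1 hr with rfl | rfl <;>
        simp [pvClassifyC, pvFinish, hs, n0, n1, pvKingdoms]
    · have n0 : "metazoa" ∉ L := not_mem_of_rank_lt (by rw [hm]; decide)
      have n1 : "animalia" ∉ L := not_mem_of_rank_lt (by rw [hm]; decide)
      have n2 : "viridiplantae" ∉ L := not_mem_of_rank_lt (by rw [hm]; decide)
      have n3 : "plantae" ∉ L := not_mem_of_rank_lt (by rw [hm]; decide)
      have hr : pvRank s = 2 := by omega
      have := rank_inv2 hr; subst this
      simp [pvClassifyC, pvFinish, hs, n0, n1, n2, n3, pvKingdoms]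
    · have n0 : "metazoa" ∉ L := not_mem_of_rank_lt (by rw [hm]; decide)
      have n1 : "animalia" ∉ L := not_mem_of_rank_lt (by rw [hm]; decide)
      have n2 : "viridiplantae" ∉ L := not_mem_of_rank_lt (by rw [hm]; decide)
      have n3 : "plantae" ∉ L := not_mem_of_rank_lt (by rw [hm]; decide)
      have n4 : "fungi" ∉ L := not_mem_of_rank_lt (by rw [hm]; decide)
      have hr : pvRank s = 3 := by omega
      have := rank_inv3 hr; subst this
      simp [pvClassifyC, pvFinish, hs, n0, n1, n2, n3, n4, pvKingdoms]
    · have n0 : "metazoa" ∉ L := not_mem_of_rank_lt (by rw [hm]; decide)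
      have n1 : "animalia" ∉ L := not_mem_of_rank_lt (by rw [hm]; decide)
      have n2 : "viridiplantae" ∉ L := not_mem_of_rank_lt (by rw [hm]; decide)
      have n3 : "plantae" ∉ L := not_mem_of_rank_lt (by rw [hm]; decide)
      have n4 : "fungi" ∉ L := not_mem_of_rank_lt (by rw [hm]; decide)
      have n5 : "bacteria" ∉ L := not_mem_of_rank_lt (by rw [hm]; decide)
      have hr : pvRank s = 4 := by omega
      have := rank_inv4 hr; subst this
      simp [pvClassifyC, pvFinish, hs, n0, n1, n2, n3, n4, n5, pvKingdoms]
    · have n0 : "metazoa" ∉ L := not_mem_of_rank_lt (by rw [hm]; decide)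
      have n1 : "animalia" ∉ L := not_mem_of_rank_lt (by rw [hm]; decide)
      have n2 : "viridiplantae" ∉ L := not_mem_of_rank_lt (by rw [hm]; decide)
      have n3 : "plantae" ∉ L := not_mem_of_rank_lt (by rw [hm]; decide)
      have n4 : "fungi" ∉ L := not_mem_of_rank_lt (by rw [hm]; decide)
      have n5 : "bacteria" ∉ L := not_mem_of_rank_lt (by rw [hm]; decide)
      have n6 : "archaea" ∉ L := not_mem_of_rank_lt (by rw [hm]; decide)
      have hr : pvRank s = 5 := by omega
      have := rank_inv5 hr; subst this
      simp [pvClassifyC, pvFinish, hs, n0, n1, n2, n3, n4, n5, n6, pvKingdoms]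
    · have n0 : "metazoa" ∉ L := not_mem_of_rank_lt (by rw [hm]; decide)
      have n1 : "animalia" ∉ L := not_mem_of_rank_lt (by rw [hm]; decide)
      have n2 : "viridiplantae" ∉ L := not_mem_of_rank_lt (by rw [hm]; decide)
      have n3 : "plantae" ∉ L := not_mem_of_rank_lt (by rw [hm]; decide)
      have n4 : "fungi" ∉ L := not_mem_of_rank_lt (by rw [hm]; decide)
      have n5 : "bacteria" ∉ L := not_mem_of_rank_lt (by rw [hm]; decide)
      have n6 : "archaea" ∉ L := not_mem_of_rank_lt (by rw [hm]; decide)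
      have n7 : "viruses" ∉ L := not_mem_of_rank_lt (by rw [hm]; decide)
      have hr : pvRank s = 6 := by omega
      have := rank_inv6 hr; subst this
      simp [pvClassifyC, pvFinish, hs, n0, n1, n2, n3, n4, n5, n6, n7, pvKingdoms]

-- B's running minimum over A's collected lineage
lemma walkB_eq_foldl (taxa : List (Int × Int × String)) (names : List (Int × String)) :
    ∀ (fuel : Nat) (curr : Int) (best : Nat),
      pvWalkB taxa names fuel curr best =
      (pvWalkA taxa names fuel curr).foldl
        (fun b n => if pvRank (PySem.Str.lower n) < b then pvRank (PySem.Str.lower n) else b) best := by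
  intro fuel
  induction fuel with
  | zero => intro curr best; simp [pvWalkA, pvWalkB]
  | succ f ih =>
    intro curr best
    simp only [pvWalkA, pvWalkB]
    cases (PySem.Dict.mk names).get? curr <;>
      split <;> simp [ih]

lemma foldl_eq_mr :
    ∀ (l : List String) (b : Nat), b ≤ 7 →
      l.foldl (fun b n => if pvRank (PySem.Str.lower n) < b then pvRank (PySem.Str.lower n) else b) b
        = min b (pvMr (l.map PySem.Str.lower)) := by
  intro l
  induction l with
  | nil => intro b hb; simp [pvMr]; omega
  | cons n L ih =>
    intro b hb
    have hstep : pvMr ((n :: L).map PySem.Str.lower)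
        = min (pvRank (PySem.Str.lower n)) (pvMr (L.map PySem.Str.lower)) := by
      simp [pvMr]
    have hb' : (if pvRank (PySem.Str.lower n) < b then pvRank (PySem.Str.lower n) else b) ≤ 7 := by
      split <;> [exact le_trans (le_of_lt ‹_›) hb; exact hb]
    simp only [List.foldl_cons]
    rw [ih _ hb', hstep]
    have := pvRank_le7 (PySem.Str.lower n)
    have := pvMr_le7 (L.map PySem.Str.lower)
    split <;> omega

-- the two ports agree on every input (fuel being equal, whether or not it suffices)
lemma ports_agree (tid : Int) (taxa : List (Int × Int × String)) (names : List (Int × String)) :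
    kingdom_from_local tid taxa names = kingdom_from_local_alt tid taxa names := by
  unfold kingdom_from_local kingdom_from_local_alt
  split
  · rfl
  · rw [walkB_eq_foldl, foldl_eq_mr _ _ (le_refl 7)]
    have h7 := pvMr_le7 ((pvWalkA taxa names (taxa.length + 1) tid).map PySem.Str.lower)
    rw [Nat.min_eq_right h7, classify_eq_classifyC, classifyC_eq_finish]
    simp [pvFinish]

-- ===== VERDICT (by name: the statement is the Claim_ definition above) =====
theorem kingdom_from_local_spec : Claim_equal_kingdom_from_local := by
  intro tid taxa names _ _
  exact ports_agree tid taxa names
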